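-- pv_equiv track=rewrite | github.com/Jamie793/MyCTFReverseWriteUp | CRACKME/CrackMeLECCIO18Crack_4st.py | rol
-- ===== SOURCE A (Python) =====
-- def rol(data, offset):
--     binData = bin(data)[2:]
--     binDataLen = len(binData)
--     if binDataLen != 32:
--         for _ in range(32-binDataLen):
--             binData = '0'+binData
--
--     for _ in range(offset):
--         binData = binData[1:]+binData[0]
--
--     return int(binData, 2) & 0xFFFFFFFF
-- ===== SOURCE B (Python) =====
-- def rol(data, offset):
--     k = max(offset, 0) % 32
--     d = data % 0x100000000
--     return (d * 2 ** k + d // 2 ** (32 - k)) % 0x100000000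
-- ===== Notes on version B (the rewrite author's own statement) =====
-- stated objective: faster
-- what changed: A builds the 32-char binary string of data by repeated '0'-prepending and rotates it one character per loop iteration (offset iterations); B computes the rotation in O(1) by modular arithmetic: with k = max(offset,0) % 32 and d = data % 2^32 it returns (d*2^k + d//2^(32-k)) % 2^32.
import Mathlib
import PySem

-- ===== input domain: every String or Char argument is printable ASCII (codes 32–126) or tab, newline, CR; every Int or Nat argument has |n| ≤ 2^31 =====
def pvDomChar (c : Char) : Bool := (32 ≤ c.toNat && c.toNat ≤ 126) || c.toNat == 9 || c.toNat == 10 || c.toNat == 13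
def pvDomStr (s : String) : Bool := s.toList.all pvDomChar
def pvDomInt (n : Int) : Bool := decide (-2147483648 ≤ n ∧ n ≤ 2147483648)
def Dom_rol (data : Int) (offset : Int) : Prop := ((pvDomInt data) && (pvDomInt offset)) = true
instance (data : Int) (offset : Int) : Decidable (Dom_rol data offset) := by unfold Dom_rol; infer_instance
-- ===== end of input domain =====

-- B replaces A's character-string rotation loop (O(offset)) by a closed-form modular-arithmetic
-- rotate with offset reduced mod 32 (O(1)); equivalence of the RETURN value is proved for data ≥ 0.

-- ===== PORT A =====
-- bin(n)[2:] for n > 0: binary digits, most significant first (empty for n = 0).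
def pyBits (n : Nat) : List Char :=
  if _h : n = 0 then []
  else pyBits (n / 2) ++ [if n % 2 = 1 then '1' else '0']
decreasing_by exact Nat.div_lt_self (Nat.pos_of_ne_zero _h) one_lt_two

-- the padding loop: binData = '0' + binData, k times
def padN : Nat → List Char → List Char
  | 0, s => s
  | k+1, s => padN k ('0' :: s)

-- the rotation loop: binData = binData[1:] + binData[0], k times
-- (binData is never empty here, so s[1:] = drop 1 and s[0] = take 1 are exact)
def rotN : Nat → List Char → List Char
  | 0, s => s
  | k+1, s => rotN k (s.drop 1 ++ s.take 1)

-- int(s, 2) for a string of '0'/'1' digits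
def bval (s : List Char) : Nat :=
  s.foldl (fun a c => 2 * a + (if c = '1' then 1 else 0)) 0

def rol (data : Int) (offset : Int) : Int :=
  -- bin(data)[2:]: exact for data ≥ 0 (Pre_rol); on data < 0 Python raises ValueError later
  let b0 := if data.toNat = 0 then ['0'] else pyBits data.toNat
  let binDataLen := b0.length
  -- if binDataLen != 32: for _ in range(32-binDataLen): binData = '0'+binData  (range clamps at 0)
  let b1 := if binDataLen ≠ 32 then padN (32 - binDataLen) b0 else b0
  -- for _ in range(offset): …  (offset iterations; none when offset ≤ 0 — toNat clamps exactly so)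
  let b2 := rotN offset.toNat b1
  -- int(binData, 2) & 0xFFFFFFFF  (the int is ≥ 0, so Nat land is exact)
  Int.ofNat (bval b2 &&& 0xFFFFFFFF)

-- ===== PORT B =====
def rol_alt (data : Int) (offset : Int) : Int :=
  -- k = max(offset, 0) % 32  (the operand is ≥ 0, so .toNat is exact)
  let k := (PySem.Int.mod (max offset 0) 32).toNat
  -- d = data % 0x100000000
  let d := PySem.Int.mod data 4294967296
  -- (d * 2**k + d // 2**(32-k)) % 0x100000000
  PySem.Int.mod (d * 2 ^ k + PySem.Int.floordiv d (2 ^ (32 - k))) 4294967296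

-- ===== PRECONDITION & SPEC =====
-- Pre_rol excludes data < 0, on which A raises ValueError (bin(-x)[2:] = 'b…' and int('…b…', 2) fails).
def Pre_rol (data : Int) (offset : Int) : Prop := 0 ≤ data
instance (data : Int) (offset : Int) : Decidable (Pre_rol data offset) := by
  unfold Pre_rol; infer_instance

def pvWitness_rol : Int × Int := (5, 3)

def Spec_rol (data : Int) (offset : Int) (out : Int) : Prop := out = rol_alt data offset
instance (data : Int) (offset : Int) (out : Int) : Decidable (Spec_rol data offset out) := by
  unfold Spec_rol; infer_instance

-- ===== CLAIM (what is proved, stated in full; the proofs are below) =====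
def Claim_equal_rol : Prop := ∀ (data : Int) (offset : Int), Dom_rol data offset →
  Pre_rol data offset → Spec_rol data offset (rol data offset)

-- ===== LEMMAS AND PROOFS =====

-- fixed-width binary representation, most significant bit first
def fw : Nat → Nat → List Char
  | 0, _ => []
  | w+1, n => fw w (n / 2) ++ [if n % 2 = 1 then '1' else '0']

-- one rotation step on the value
def gstep (x : Nat) : Nat := (x % 2147483648) * 2 + x / 2147483648

-- the value after j rotation steps (j ≤ 32)
def Frot (j n : Nat) : Nat := (n % 2 ^ (32 - j)) * 2 ^ j + n / 2 ^ (32 - j)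

theorem fw_succ (w n : Nat) :
    fw (w+1) n = fw w (n / 2) ++ [if n % 2 = 1 then '1' else '0'] := rfl

theorem pyBits_zero : pyBits 0 = [] := by rw [pyBits]; simp

theorem pyBits_ne (n : Nat) (h : n ≠ 0) :
    pyBits n = pyBits (n / 2) ++ [if n % 2 = 1 then '1' else '0'] := by
  conv_lhs => rw [pyBits]
  simp [h]

theorem padN_eq (k : Nat) (s : List Char) : padN k s = List.replicate k '0' ++ s := by
  induction k generalizing s with
  | zero => simp [padN]
  | succ k ih =>
      rw [padN, ih, List.replicate_succ' (n := k)]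
      simp

theorem fw_zero (w : Nat) : fw w 0 = List.replicate w '0' := by
  induction w with
  | zero => simp [fw]
  | succ w ih => rw [fw_succ, Nat.zero_div, ih, List.replicate_succ' (n := w)]; simp

theorem fw_eq_pad (w n : Nat) (hpos : 0 < n) (hlt : n < 2 ^ w) :
    fw w n = List.replicate (w - (pyBits n).length) '0' ++ pyBits n := by
  induction w generalizing n with
  | zero => omega
  | succ w ih =>
      rw [fw_succ, pyBits_ne n (by omega)]
      by_cases h2 : n / 2 = 0
      · have hn1 : n = 1 := by omega
        subst hn1
        simp [fw_zero, pyBits_zero]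
      · have hdlt : n / 2 < 2 ^ w := by
          rw [Nat.div_lt_iff_lt_mul (by norm_num)]
          calc n < 2 ^ (w+1) := hlt
          _ = 2 ^ w * 2 := by rw [pow_succ]
        rw [ih (n / 2) (by omega) hdlt]
        simp only [List.length_append, List.length_singleton, List.append_assoc]
        congr 2
        omega

theorem fw_msb (w n : Nat) :
    fw (w+1) n = (if n / 2 ^ w % 2 = 1 then '1' else '0') :: fw w (n % 2 ^ w) := by
  induction w generalizing n with
  | zero => simp [fw]
  | succ w ih =>
      have h1 : n / 2 / 2 ^ w = n / 2 ^ (w+1) := by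
        rw [Nat.div_div_eq_div_mul, ← pow_succ']
      have h2 : n / 2 % 2 ^ w = n % 2 ^ (w+1) / 2 := by
        rw [show (2:Nat) ^ (w+1) = 2 * 2 ^ w from by rw [pow_succ']]
        rw [Nat.mod_mul_right_div_self]
      have h3 : n % 2 = n % 2 ^ (w+1) % 2 := by
        rw [Nat.mod_mod_of_dvd _ (dvd_pow_self 2 (by omega))]
      rw [fw_succ (w+1) n, ih (n/2), fw_succ w (n % 2 ^ (w+1)), ← h1, ← h2, ← h3]
      simp

theorem fw_rot_step (n : Nat) (hn : n < 2 ^ 32) :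
    (fw 32 n).drop 1 ++ (fw 32 n).take 1 = fw 32 (gstep n) := by
  have h := fw_msb 31 n
  have ht : n / 2 ^ 31 ≤ 1 := by
    have : n / 2 ^ 31 < 2 := by
      rw [Nat.div_lt_iff_lt_mul (by norm_num)]
      norm_num at hn ⊢; omega
    omega
  have hg : gstep n = (n % 2 ^ 31) * 2 + n / 2 ^ 31 := by
    simp only [gstep]; norm_num
  have hdiv : gstep n / 2 = n % 2 ^ 31 := by rw [hg]; omega
  have hmod : gstep n % 2 = n / 2 ^ 31 := by rw [hg]; omega
  have hchar : n / 2 ^ 31 % 2 = n / 2 ^ 31 := by omega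
  rw [show (32:Nat) = 31 + 1 from rfl]
  rw [h, fw_succ 31 (gstep n), hdiv, hmod, hchar]
  simp only [List.drop_succ_cons, List.drop_zero, List.take_succ_cons, List.take_zero]

theorem gstep_lt (n : Nat) (hn : n < 2 ^ 32) : gstep n < 2 ^ 32 := by
  simp only [gstep]; norm_num at hn ⊢; omega

theorem rotN_fw (k n : Nat) (hn : n < 2 ^ 32) :
    rotN k (fw 32 n) = fw 32 (gstep^[k] n) := by
  induction k generalizing n with
  | zero => simp [rotN]
  | succ k ih =>
      rw [rotN, fw_rot_step n hn, ih (gstep n) (gstep_lt n hn),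
        Function.iterate_succ_apply]

theorem bval_fw (w n : Nat) (hn : n < 2 ^ w) : bval (fw w n) = n := by
  induction w generalizing n with
  | zero => simp [fw, bval]; omega
  | succ w ih =>
      have hdlt : n / 2 < 2 ^ w := by
        rw [Nat.div_lt_iff_lt_mul (by norm_num)]
        calc n < 2 ^ (w+1) := hn
        _ = 2 ^ w * 2 := by rw [pow_succ]
      rw [fw_succ]
      simp only [bval, List.foldl_append] at *
      rw [ih (n / 2) hdlt]
      by_cases h : n % 2 = 1 <;> simp [h, List.foldl] <;> omega

theorem Frot_zero (n : Nat) (hn : n < 2 ^ 32) : Frot 0 n = n := by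
  simp only [Frot, Nat.sub_zero, pow_zero, mul_one]
  norm_num at hn ⊢
  omega

theorem Frot_32 (n : Nat) : Frot 32 n = n := by
  simp [Frot, Nat.mod_one]

theorem gstep_Frot (j n : Nat) (hj : j < 32) (hn : n < 2 ^ 32) :
    gstep (Frot j n) = Frot (j+1) n := by
  set Q := 2 ^ (31 - j) with hQ
  have hQpos : 0 < Q := Nat.two_pow_pos _
  have h2Q : (2:Nat) ^ (32 - j) = Q * 2 := by
    rw [hQ, ← pow_succ]; congr 1; omega
  have hQj : Q * 2 ^ j = 2147483648 := by
    rw [hQ, ← pow_add, show 31 - j + j = 31 from by omega]; norm_num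
  set m := n / Q with hm
  set r' := n % Q with hr'
  have hr'lt : r' < Q := Nat.mod_lt _ hQpos
  have hmlt : m < 2 ^ j * 2 := by
    rw [hm, Nat.div_lt_iff_lt_mul hQpos]
    calc n < 2 ^ 32 := hn
    _ = 2 ^ j * 2 * Q := by
        rw [mul_comm (2 ^ j * 2) Q, ← mul_assoc, hQj]; norm_num
  have hmod : n % 2 ^ (32 - j) = r' + Q * (m % 2) := by
    rw [h2Q]; exact Nat.mod_mul
  have hdiv : n / 2 ^ (32 - j) = m / 2 := by
    rw [h2Q, ← Nat.div_div_eq_div_mul]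
  have hybound : r' * 2 ^ j + 2 ^ j ≤ 2147483648 := by
    calc r' * 2 ^ j + 2 ^ j = (r' + 1) * 2 ^ j := by ring
    _ ≤ Q * 2 ^ j := Nat.mul_le_mul_right _ (by omega)
    _ = 2147483648 := hQj
  have hF : Frot j n = (m % 2) * 2147483648 + (r' * 2 ^ j + m / 2) := by
    rw [Frot, hmod, hdiv, add_mul, mul_comm Q (m % 2), mul_assoc, hQj]
    ring
  have hF1 : Frot (j+1) n = 2 * (r' * 2 ^ j) + m := by
    rw [Frot, show 32 - (j+1) = 31 - j from by omega, ← hQ, ← hr', ← hm, pow_succ]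
    ring
  rw [hF, hF1, gstep]
  generalize hy : r' * 2 ^ j = y at *
  have h2j : 0 < 2 ^ j := Nat.two_pow_pos _
  omega

theorem gstep_iter_le (j n : Nat) (hj : j ≤ 32) (hn : n < 2 ^ 32) :
    gstep^[j] n = Frot j n := by
  induction j with
  | zero => simp [Frot_zero n hn]
  | succ j ih =>
      rw [Function.iterate_succ_apply', ih (by omega), gstep_Frot j n (by omega) hn]

theorem gstep_iter_mod (k n : Nat) (hn : n < 2 ^ 32) :
    gstep^[k] n = Frot (k % 32) n := by
  induction k using Nat.strong_induction_on with
  | _ k ih =>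
      by_cases h : k < 32
      · rw [Nat.mod_eq_of_lt h, gstep_iter_le k n (by omega) hn]
      · have hk : k = (k - 32) + 32 := by omega
        rw [hk, Function.iterate_add_apply,
          gstep_iter_le 32 n le_rfl hn, Frot_32,
          ih (k - 32) (by omega)]
        congr 1
        omega

theorem gstep_iter_lt (k n : Nat) (hn : n < 2 ^ 32) : gstep^[k] n < 2 ^ 32 := by
  induction k with
  | zero => simpa
  | succ k ih => rw [Function.iterate_succ_apply']; exact gstep_lt _ ih

-- closed form of B's arithmetic: (n * 2^k + n / 2^(32-k)) % 2^32 = Frot k n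
theorem closed_form_eq_Frot (k n : Nat) (hk : k < 32) (hn : n < 2 ^ 32) :
    (n * 2 ^ k + n / 2 ^ (32 - k)) % 4294967296 = Frot k n := by
  set Q := 2 ^ (32 - k) with hQ
  have hQpos : 0 < Q := Nat.two_pow_pos _
  have hQj : Q * 2 ^ k = 4294967296 := by
    rw [hQ, ← pow_add, show 32 - k + k = 32 from by omega]; norm_num
  set q := n / Q with hq
  set r := n % Q with hr
  have hrlt : r < Q := Nat.mod_lt _ hQpos
  have hqlt : q < 2 ^ k := by
    rw [hq, Nat.div_lt_iff_lt_mul hQpos]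
    calc n < 2 ^ 32 := hn
    _ = 2 ^ k * Q := by rw [mul_comm, hQj]; norm_num
  have hrb : r * 2 ^ k + 2 ^ k ≤ 4294967296 := by
    calc r * 2 ^ k + 2 ^ k = (r + 1) * 2 ^ k := by ring
    _ ≤ Q * 2 ^ k := Nat.mul_le_mul_right _ (by omega)
    _ = 4294967296 := hQj
  have hsplit : n * 2 ^ k = q * 4294967296 + r * 2 ^ k := by
    calc n * 2 ^ k = (Q * q + r) * 2 ^ k := by rw [hq, hr, Nat.div_add_mod]
    _ = q * (Q * 2 ^ k) + r * 2 ^ k := by ring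
    _ = q * 4294967296 + r * 2 ^ k := by rw [hQj]
  rw [Frot, ← hQ, ← hq, ← hr, hsplit]
  generalize r * 2 ^ k = y at *
  omega

-- A computes Frot (offset.toNat % 32) data.toNat
theorem rol_eq_Frot (data offset : Int) (h0 : 0 ≤ data) (h1 : data ≤ 2147483648) :
    rol data offset = Int.ofNat (Frot (offset.toNat % 32) data.toNat) := by
  set n := data.toNat with hn
  have hnlt : n < 2 ^ 32 := by norm_num; omega
  have hpad : (if (if n = 0 then ['0'] else pyBits n).length ≠ 32 then
      padN (32 - (if n = 0 then ['0'] else pyBits n).length) (if n = 0 then ['0'] else pyBits n)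
      else (if n = 0 then ['0'] else pyBits n)) = fw 32 n := by
    by_cases h : n = 0
    · simp only [h, if_pos rfl, if_true, List.length_singleton,
        show (1:Nat) ≠ 32 from by omega, if_pos, padN_eq, fw_zero]
      simp [List.replicate_succ' (n := 31)]
    · rw [if_neg h, fw_eq_pad 32 n (by omega) hnlt]
      by_cases hl : (pyBits n).length = 32
      · rw [if_neg (by simp [hl]), hl]
        simp
      · rw [if_pos (by simp [hl]), padN_eq]
  show Int.ofNat (bval (rotN offset.toNat _) &&& 0xFFFFFFFF) = _
  rw [hpad, rotN_fw _ _ hnlt, bval_fw 32 _ (gstep_iter_lt _ _ hnlt),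
    gstep_iter_mod _ _ hnlt]
  congr 1
  have hlt := gstep_iter_lt offset.toNat n hnlt
  rw [gstep_iter_mod _ _ hnlt] at hlt
  have hand := Nat.and_two_pow_sub_one_eq_mod (Frot (offset.toNat % 32) n) 32
  norm_num at hand hlt ⊢
  rw [hand]
  omega

-- B, on the same inputs, also computes Frot (offset.toNat % 32) data.toNat
theorem rol_alt_eq_Frot (data offset : Int) (h0 : 0 ≤ data) (h1 : data ≤ 2147483648) :
    rol_alt data offset = Int.ofNat (Frot (offset.toNat % 32) data.toNat) := by
  set n := data.toNat with hn
  have hnlt : n < 2 ^ 32 := by norm_num; omega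
  have hd : data = (n : Int) := by omega
  have hkeq : (PySem.Int.mod (max offset 0) 32).toNat = offset.toNat % 32 := by
    rw [PySem.Int.mod_eq_emod_of_pos (by norm_num)]
    rcases (by omega : 0 ≤ offset ∨ offset < 0) with h | h
    · rw [max_eq_left h]; omega
    · rw [max_eq_right (by omega : offset ≤ 0)]; omega
  have hdm : PySem.Int.mod data 4294967296 = (n : Int) := by
    rw [PySem.Int.mod_eq_emod_of_pos (by norm_num)]
    omega
  set k := (PySem.Int.mod (max offset 0) 32).toNat with hk
  have hklt : k < 32 := by rw [hkeq]; omega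
  show PySem.Int.mod (PySem.Int.mod data 4294967296 * 2 ^ k +
      PySem.Int.floordiv (PySem.Int.mod data 4294967296) (2 ^ (32 - k))) 4294967296 = _
  rw [hdm]
  have hfd : PySem.Int.floordiv (n : Int) (2 ^ (32 - k)) =
      ((n / 2 ^ (32 - k) : Nat) : Int) := by
    rw [show ((2:Int) ^ (32 - k)) = ((2 ^ (32 - k) : Nat) : Int) from by push_cast; ring]
    exact PySem.Int.floordiv_natCast _ _
  rw [hfd,
    show ((n : Int) * 2 ^ k + ((n / 2 ^ (32 - k) : Nat) : Int)) =
      (((n * 2 ^ k + n / 2 ^ (32 - k) : Nat)) : Int) from by push_cast; ring,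
    PySem.Int.mod_eq_emod_of_pos (by norm_num)]
  have key := closed_form_eq_Frot k n hklt hnlt
  rw [← hkeq, ← key, Int.ofNat_eq_natCast]
  push_cast
  norm_num

-- ===== VERDICT (by name: the statement is the Claim_ definition above) =====
theorem rol_spec : Claim_equal_rol := by
  intro data offset hdom hpre
  unfold Spec_rol
  have hdom' : data ≤ 2147483648 := by
    unfold Dom_rol at hdom
    simp [pvDomInt] at hdom
    exact hdom.1.2
  rw [rol_eq_Frot data offset hpre hdom', rol_alt_eq_Frot data offset hpre hdom']
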